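-- pv_equiv track=rewrite | github.com/joyhpc/opendatasheet | scripts/export_for_sch_review.py | _config_signal_summary
-- ===== SOURCE A (Python) =====
-- def _safe_upper(value: str | None) -> str:
--     return (value or "").upper()
--
-- def _config_signal_summary(pins: list[dict]) -> dict:
--     names = [pin.get("name") for pin in pins if pin.get("name")]
--     upper_names = [_safe_upper(name) for name in names]
--     mode_signals = [name for name in names if any(token in _safe_upper(name) for token in ("MODE", "M0_", "M1_", "M2_", "CFGBVS", "PUDC", "BOOT"))]
--     status_signals = [name for name in names if any(token in _safe_upper(name) for token in ("DONE", "READY", "INIT", "PROGRAM", "RECONFIG"))]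
--     jtag_signals = [name for name in names if any(token in _safe_upper(name) for token in ("TCK", "TMS", "TDI", "TDO", "JTAG"))]
--     interfaces = []
--     if jtag_signals:
--         interfaces.append("JTAG")
--     if any(token in " ".join(upper_names) for token in ("MSPI", "SSPI", "SPI")):
--         interfaces.append("SPI")
--     return {
--         "mode_signals": sorted(set(mode_signals)),
--         "status_signals": sorted(set(status_signals)),
--         "jtag_signals": sorted(set(jtag_signals)),
--         "interfaces": interfaces,
--     }
-- ===== SOURCE B (Python) =====
-- def _config_signal_summary(pins: list[dict]) -> dict:
--     mode, status, jtag = [], [], []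
--     spi = False
--     for pin in pins:
--         name = pin.get("name")
--         if not name:
--             continue
--         upper = name.upper()
--         if any(t in upper for t in ("MODE", "M0_", "M1_", "M2_", "CFGBVS", "PUDC", "BOOT")):
--             mode.append(name)
--         if any(t in upper for t in ("DONE", "READY", "INIT", "PROGRAM", "RECONFIG")):
--             status.append(name)
--         if any(t in upper for t in ("TCK", "TMS", "TDI", "TDO", "JTAG")):
--             jtag.append(name)
--         if "SPI" in upper:
--             spi = True
--     interfaces = []
--     if jtag:
--         interfaces.append("JTAG")
--     if spi:
--         interfaces.append("SPI")
--     return {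
--         "mode_signals": sorted(set(mode)),
--         "status_signals": sorted(set(status)),
--         "jtag_signals": sorted(set(jtag)),
--         "interfaces": interfaces,
--     }
-- ===== Notes on version B (the rewrite author's own statement) =====
-- stated objective: alternative
-- what changed: A makes four independent scans over the pin list (one comprehension per bucket) plus a joined-uppercase-string substring test for SPI; B classifies in a single pass that fills all three buckets and an SPI flag per pin, using that 'SPI' occurs in the space-joined names iff it occurs in some single name.
import Mathlib
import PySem

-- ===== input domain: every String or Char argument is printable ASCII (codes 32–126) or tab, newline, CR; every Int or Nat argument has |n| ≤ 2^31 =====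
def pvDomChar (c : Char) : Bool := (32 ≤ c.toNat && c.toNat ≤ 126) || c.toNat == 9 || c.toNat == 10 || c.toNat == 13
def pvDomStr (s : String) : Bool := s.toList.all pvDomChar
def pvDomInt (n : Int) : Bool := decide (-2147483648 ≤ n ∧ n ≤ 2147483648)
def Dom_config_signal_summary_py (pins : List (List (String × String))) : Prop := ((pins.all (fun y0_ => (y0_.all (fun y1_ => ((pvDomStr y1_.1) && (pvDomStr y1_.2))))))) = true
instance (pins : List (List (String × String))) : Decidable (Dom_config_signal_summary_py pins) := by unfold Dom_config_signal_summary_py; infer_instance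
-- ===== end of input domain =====

-- B replaces A's four separate scans over the pin list (plus a joined-string SPI test) by a
-- single classification pass that fills all three buckets and an SPI flag at once (objective:
-- alternative decomposition; same asymptotic cost).

-- ===== PORT A =====
def pvSafeUpper (value : Option String) : String :=
  PySem.Str.upper (match value with
    | some s => if s == "" then "" else s
    | none => "")

def pvModeTokens : List String := ["MODE", "M0_", "M1_", "M2_", "CFGBVS", "PUDC", "BOOT"]
def pvStatusTokens : List String := ["DONE", "READY", "INIT", "PROGRAM", "RECONFIG"]
def pvJtagTokens : List String := ["TCK", "TMS", "TDI", "TDO", "JTAG"]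

def config_signal_summary_py (pins : List (List (String × String))) : List (String × List String) :=
  let names : List String := pins.filterMap (fun pin =>
    match PySem.Dict.get? ⟨pin⟩ "name" with
    | some s => if s == "" then none else some s
    | none => none)
  let upper_names := names.map (fun name => pvSafeUpper (some name))
  let mode_signals := names.filter (fun name =>
    pvModeTokens.any (fun token => PySem.Str.isIn token (pvSafeUpper (some name))))
  let status_signals := names.filter (fun name =>
    pvStatusTokens.any (fun token => PySem.Str.isIn token (pvSafeUpper (some name))))
  let jtag_signals := names.filter (fun name =>
    pvJtagTokens.any (fun token => PySem.Str.isIn token (pvSafeUpper (some name))))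
  let interfaces : List String := []
  let interfaces := if jtag_signals ≠ [] then interfaces ++ ["JTAG"] else interfaces
  let interfaces := if (["MSPI", "SSPI", "SPI"] : List String).any
      (fun token => PySem.Str.isIn token (PySem.Str.join " " upper_names)) then
      interfaces ++ ["SPI"] else interfaces
  [("mode_signals", PySem.List.sorted (PySem.Set.ofList mode_signals) (fun x => x) false),
   ("status_signals", PySem.List.sorted (PySem.Set.ofList status_signals) (fun x => x) false),
   ("jtag_signals", PySem.List.sorted (PySem.Set.ofList jtag_signals) (fun x => x) false),
   ("interfaces", interfaces)]

-- ===== PORT B =====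
-- one classification pass: state = (mode bucket, status bucket, jtag bucket, spi flag)
def pvClassifyStep (st : List String × List String × List String × Bool)
    (pin : List (String × String)) : List String × List String × List String × Bool :=
  match PySem.Dict.get? ⟨pin⟩ "name" with
  | none => st
  | some name =>
    if name == "" then st
    else
      let u := PySem.Str.upper name
      let st := if pvModeTokens.any (fun t => PySem.Str.isIn t u) then
        (st.1 ++ [name], st.2.1, st.2.2.1, st.2.2.2) else st
      let st := if pvStatusTokens.any (fun t => PySem.Str.isIn t u) then
        (st.1, st.2.1 ++ [name], st.2.2.1, st.2.2.2) else st
      let st := if pvJtagTokens.any (fun t => PySem.Str.isIn t u) then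
        (st.1, st.2.1, st.2.2.1 ++ [name], st.2.2.2) else st
      if PySem.Str.isIn "SPI" u then (st.1, st.2.1, st.2.2.1, true) else st

def config_signal_summary_py_alt (pins : List (List (String × String))) : List (String × List String) :=
  let st := pins.foldl pvClassifyStep ([], [], [], false)
  let interfaces := (if st.2.2.1 ≠ [] then ["JTAG"] else []) ++ (if st.2.2.2 then ["SPI"] else [])
  [("mode_signals", PySem.List.sorted (PySem.Set.ofList st.1) (fun x => x) false),
   ("status_signals", PySem.List.sorted (PySem.Set.ofList st.2.1) (fun x => x) false),
   ("jtag_signals", PySem.List.sorted (PySem.Set.ofList st.2.2.1) (fun x => x) false),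
   ("interfaces", interfaces)]

-- ===== PRECONDITION & SPEC =====
def Spec_config_signal_summary_py (pins : List (List (String × String))) (out : List (String × List String)) : Prop := out = config_signal_summary_py_alt pins
instance (pins : List (List (String × String))) (out : List (String × List String)) : Decidable (Spec_config_signal_summary_py pins out) := by unfold Spec_config_signal_summary_py; infer_instance

-- ===== CLAIM (what is proved, stated in full; the proofs are below) =====
def Claim_equal_config_signal_summary_py : Prop := ∀ (pins : List (List (String × String))), Dom_config_signal_summary_py pins → Spec_config_signal_summary_py pins (config_signal_summary_py pins)

-- ===== LEMMAS AND PROOFS =====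

-- the (falsy-filtered) name of a pin, exactly as both ports compute it
def pvName (pin : List (String × String)) : Option String :=
  match PySem.Dict.get? ⟨pin⟩ "name" with
  | some s => if s == "" then none else some s
  | none => none

def pvIsMode (n : String) : Bool := pvModeTokens.any (fun t => PySem.Str.isIn t (PySem.Str.upper n))
def pvIsStatus (n : String) : Bool := pvStatusTokens.any (fun t => PySem.Str.isIn t (PySem.Str.upper n))
def pvIsJtag (n : String) : Bool := pvJtagTokens.any (fun t => PySem.Str.isIn t (PySem.Str.upper n))
def pvIsSpi (n : String) : Bool := PySem.Str.isIn "SPI" (PySem.Str.upper n)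

theorem pvSafeUpper_some (n : String) : pvSafeUpper (some n) = PySem.Str.upper n := by
  by_cases h : n = "" <;> simp [pvSafeUpper, h]

theorem pvFold_spec (pins : List (List (String × String)))
    (m s j : List String) (b : Bool) :
    pins.foldl pvClassifyStep (m, s, j, b) =
      (m ++ (pins.filterMap pvName).filter pvIsMode,
       s ++ (pins.filterMap pvName).filter pvIsStatus,
       j ++ (pins.filterMap pvName).filter pvIsJtag,
       b || (pins.filterMap pvName).any pvIsSpi) := by
  induction pins generalizing m s j b with
  | nil => simp
  | cons pin rest ih =>
    simp only [List.foldl_cons, List.filterMap_cons, pvClassifyStep, pvName]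
    cases h : PySem.Dict.get? ⟨pin⟩ "name" with
    | none => exact ih m s j b
    | some name =>
      by_cases he : name = ""
      · simp only [he, beq_self_eq_true, if_true]; exact ih m s j b
      · simp only [show ((name == "") = false) from by simp [he], Bool.false_eq_true, if_false]
        split_ifs <;>
          simp only [pvName, pvIsMode, pvIsStatus, pvIsJtag, pvIsSpi, List.filter_cons,
            List.any_cons, *] <;>
          simp [List.append_assoc, *]

-- a list with no occurrence of c that is a prefix of xs ++ c :: ys is a prefix of xs
theorem pvPrefix_cut {p xs ys : List Char} {c : Char} (hc : c ∉ p)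
    (h : p <+: xs ++ c :: ys) : p <+: xs := by
  by_cases hl : p.length ≤ xs.length
  · exact List.prefix_of_prefix_length_le h (xs.prefix_append (c :: ys)) hl
  · exfalso
    apply hc
    have hg : p[xs.length]? = (xs ++ c :: ys)[xs.length]? := by
      rcases h with ⟨t, ht⟩
      rw [← ht, List.getElem?_append_left (by omega)]
    rw [List.getElem?_append_right (Nat.le_refl _)] at hg
    simp at hg
    exact List.mem_of_getElem? hg

theorem pvInfix_cut {p : List Char} {c : Char} (hc : c ∉ p) :
    ∀ xs ys : List Char, p <:+: xs ++ c :: ys → p <:+: xs ∨ p <:+: ys := by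
  intro xs
  induction xs with
  | nil =>
    intro ys h
    rw [List.nil_append] at h
    rcases List.infix_cons_iff.mp h with hpre | hinf
    · cases p with
      | nil => exact Or.inl (List.nil_infix)
      | cons a q =>
        rcases List.cons_prefix_cons.mp hpre with ⟨hac, -⟩
        exact absurd (hac ▸ List.mem_cons_self) hc
    · exact Or.inr hinf
  | cons x xs ih =>
    intro ys h
    rw [List.cons_append] at h
    rcases List.infix_cons_iff.mp h with hpre | hinf
    · exact Or.inl (pvPrefix_cut hc (show p <+: (x :: xs) ++ c :: ys from by rwa [List.cons_append])).isInfix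
    · rcases ih ys hinf with h1 | h2
      · exact Or.inl (h1.trans (List.infix_cons List.infix_rfl))
      · exact Or.inr h2

theorem pvIntercalate_cons₂ (s a b : List Char) (t : List (List Char)) :
    List.intercalate s (a :: b :: t) = a ++ s ++ List.intercalate s (b :: t) := by
  simp [List.intercalate, List.intersperse_cons₂]

theorem pvMem_infix_intercalate {c : Char} {l : List Char} {ls : List (List Char)}
    (h : l ∈ ls) : l <:+: List.intercalate [c] ls := by
  induction ls with
  | nil => cases h
  | cons a rest ih =>
    rcases List.mem_cons.mp h with rfl | hm
    · cases rest with
      | nil => simp [List.intercalate, List.intersperse_single]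
      | cons b t =>
        rw [pvIntercalate_cons₂, List.append_assoc]
        exact (List.prefix_append l _).isInfix
    · cases rest with
      | nil => cases hm
      | cons b t =>
        rw [pvIntercalate_cons₂]
        exact (ih hm).trans (List.suffix_append _ _).isInfix

-- a nonempty pattern avoiding the separator is inside the joined string iff inside some piece
theorem pvInfix_intercalate {p : List Char} {c : Char} (hp : p ≠ []) (hc : c ∉ p)
    (ls : List (List Char)) :
    p <:+: List.intercalate [c] ls ↔ ∃ l ∈ ls, p <:+: l := by
  constructor
  · induction ls with
    | nil =>
      intro h
      rw [show List.intercalate [c] ([] : List (List Char)) = [] from rfl] at h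
      exact absurd (List.eq_nil_of_infix_nil h) hp
    | cons a rest ih =>
      intro h
      cases rest with
      | nil =>
        exact ⟨a, by simp, by simpa [List.intercalate, List.intersperse_single] using h⟩
      | cons b t =>
        rw [pvIntercalate_cons₂, List.append_assoc, List.singleton_append] at h
        rcases pvInfix_cut hc a _ h with h1 | h2
        · exact ⟨a, by simp, h1⟩
        · rcases ih h2 with ⟨l, hl, hpl⟩
          exact ⟨l, List.mem_cons_of_mem a hl, hpl⟩
  · rintro ⟨l, hl, hpl⟩
    exact hpl.trans (pvMem_infix_intercalate hl)

theorem pvSpi_join (us : List String) :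
    (["MSPI", "SSPI", "SPI"] : List String).any
      (fun token => PySem.Str.isIn token (PySem.Str.join " " us)) =
      us.any (fun u => PySem.Str.isIn "SPI" u) := by
  rw [Bool.eq_iff_iff]
  simp only [List.any_cons, List.any_nil, Bool.or_false, Bool.or_eq_true,
    PySem.Str.isIn_iff_infix, List.any_eq_true]
  have hto : (PySem.Str.join " " us).toList = List.intercalate [' '] (us.map String.toList) := by
    rw [PySem.Str.toList_join]; rfl
  rw [hto]
  have key : ∀ p : List Char, p ≠ [] → ' ' ∉ p →
      (p <:+: List.intercalate [' '] (us.map String.toList) ↔ ∃ u ∈ us, p <:+: u.toList) := by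
    intro p h1 h2
    rw [pvInfix_intercalate h1 h2]
    constructor
    · rintro ⟨l, hl, hpl⟩
      rcases List.mem_map.mp hl with ⟨u, hu, rfl⟩
      exact ⟨u, hu, hpl⟩
    · rintro ⟨u, hu, hpu⟩
      exact ⟨u.toList, List.mem_map_of_mem hu, hpu⟩
  constructor
  · rintro (h | h | h)
    · exact (key _ (by decide) (by decide)).mp
        ((show ("SPI".toList : List Char) <:+: "MSPI".toList from ⟨['M'], [], rfl⟩).trans h)
    · exact (key _ (by decide) (by decide)).mp
        ((show ("SPI".toList : List Char) <:+: "SSPI".toList from ⟨['S'], [], rfl⟩).trans h)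
    · exact (key _ (by decide) (by decide)).mp h
  · intro h
    exact Or.inr (Or.inr ((key _ (by decide) (by decide)).mpr h))

-- ===== VERDICT (by name: the statement is the Claim_ definition above) =====
theorem config_signal_summary_py_spec : Claim_equal_config_signal_summary_py := by
  intro pins _
  show config_signal_summary_py pins = config_signal_summary_py_alt pins
  unfold config_signal_summary_py config_signal_summary_py_alt
  rw [pvFold_spec]
  have hM : (fun name => pvModeTokens.any fun token =>
      PySem.Str.isIn token (pvSafeUpper (some name))) = pvIsMode :=
    funext fun n => by rw [pvSafeUpper_some]; rfl
  have hS : (fun name => pvStatusTokens.any fun token =>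
      PySem.Str.isIn token (pvSafeUpper (some name))) = pvIsStatus :=
    funext fun n => by rw [pvSafeUpper_some]; rfl
  have hJ : (fun name => pvJtagTokens.any fun token =>
      PySem.Str.isIn token (pvSafeUpper (some name))) = pvIsJtag :=
    funext fun n => by rw [pvSafeUpper_some]; rfl
  have hU : (fun name => pvSafeUpper (some name)) = PySem.Str.upper :=
    funext fun n => pvSafeUpper_some n
  have hSpi : (fun n => PySem.Str.isIn "SPI" (PySem.Str.upper n)) = pvIsSpi :=
    funext fun _ => rfl
  simp only [List.nil_append, Bool.false_or, hM, hS, hJ, hU, pvSpi_join, List.any_map,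
    Function.comp_def, hSpi, pvName]
  split_ifs <;> simp_all
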